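-- pv_equiv track=rewrite | github.com/vanschependom/KULAK_beginselen-van-programmeren | HC7/slides-les7-complexiteit-intuitief.py | loketRijenNaiefSlimmer
-- ===== SOURCE A (Python) =====
-- import itertools
--
-- def loketRijenNaiefSlimmer(lengte, a='A', b='B'):
--     '''
--     Genereert alle geldige loketrijen van gegeven lengte
--     door alle mogelijke rijen te genereren en enkel die
--     te behouden die aan de voorwaarde voldoen.
--     Parameters
--     ----------
--     lengte : int
--     a : chr
--         Het character dat mensen voorstelt die met 5€ betalen.
--     b : chr
--         Het character dat mensen voorstelt die met 10€ betalen.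
--     Returns
--     -------
--     [str]
--     '''
--     # bepaal alle mogelijke strings via slimme en snelle python functie
--     # deze functie maakt een iterator: genereert niet eerst alles in
--     # 1 grote lijst, maar wel on-the-fly,
--     # pas wanneer je het gebruikt in de for-loop !
--     # overloop ze en houd enkel de goede strings over
--     result = []
--     for optie in itertools.product(a + b,repeat = lengte):
--         # overloop de posities in de string
--         # veronderstel dat alles goed is aan het begin
--         goed = True
--         # houd bij hoeveel a's en b's je telt
--         aantalA = 0
--         aantalB = 0
--         for i in range(len(optie)):
--             if optie[i] == a:
--                 aantalA += 1
--             else: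
--                 aantalB += 1
--             # indien er teveel B's zijn is de string niet goed
--             if aantalB > aantalA:
--                 goed = False
--                 # je kan de lus al stoppen hier om niet nodeloos verder te zoeken
--                 break
--         if goed:
--             result.append(optie)
--     return result
-- ===== SOURCE B (Python) =====
-- def loketRijenNaiefSlimmer(lengte, a='A', b='B'):
--     """Depth-first backtracking with an explicit stack: a partial sequence is
--     extended only while its prefix keeps #non-a-tokens <= #a-tokens, so
--     invalid branches are pruned instead of enumerated and filtered."""
--     pool = list(a + b)
--     rpool = pool[::-1]
--     result = []
--     stack = [((), 0, 0, lengte)]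
--     while stack:
--         seq, na, nb, rem = stack.pop()
--         if rem == 0:
--             result.append(seq)
--             continue
--         # push children in reverse pool order so they pop in pool order
--         for t in rpool:
--             if t == a:
--                 na2, nb2 = na + 1, nb
--             else:
--                 na2, nb2 = na, nb + 1
--             if nb2 <= na2:
--                 stack.append((seq + (t,), na2, nb2, rem - 1))
--     return result
-- ===== Notes on version B (the rewrite author's own statement) =====
-- stated objective: alternative
-- what changed: Replaces the generate-all-tuples-then-filter loop by explicit-stack depth-first backtracking that extends a partial sequence only while the prefix condition holds, pruning invalid branches at the first bad prefix.
import Mathlib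
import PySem

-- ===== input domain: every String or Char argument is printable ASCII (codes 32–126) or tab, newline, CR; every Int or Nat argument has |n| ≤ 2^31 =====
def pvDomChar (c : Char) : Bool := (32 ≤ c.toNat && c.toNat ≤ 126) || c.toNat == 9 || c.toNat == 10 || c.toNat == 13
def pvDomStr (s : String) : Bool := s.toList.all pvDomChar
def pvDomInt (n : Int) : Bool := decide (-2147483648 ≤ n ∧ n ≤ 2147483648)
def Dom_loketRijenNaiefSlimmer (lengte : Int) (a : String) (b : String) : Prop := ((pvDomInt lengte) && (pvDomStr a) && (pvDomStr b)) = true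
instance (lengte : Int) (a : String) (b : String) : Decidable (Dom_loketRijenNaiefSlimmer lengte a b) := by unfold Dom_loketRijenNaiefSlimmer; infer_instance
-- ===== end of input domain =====

-- B replaces generate-all-tuples-then-filter by explicit-stack backtracking that prunes invalid prefixes (alternative algorithm).

-- ===== PORT A =====
-- itertools.product(pool, repeat = n): all n-tuples over pool in lexicographic
-- order (leftmost coordinate varies slowest), each coordinate a 1-char string.
def pyProduct (pool : List String) : Nat → List (List String)
  | 0 => [[]]
  | n + 1 => pool.flatMap (fun t => (pyProduct pool n).map (fun o => t :: o))

-- the inner for-loop of A: counts a's and b's along the tuple, breaking (false)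
-- as soon as aantalB > aantalA.
def goedLoop (a : String) : List String → Int → Int → Bool
  | [], _, _ => true
  | t :: rest, aantalA, aantalB =>
    let aantalA' := if t == a then aantalA + 1 else aantalA
    let aantalB' := if t == a then aantalB else aantalB + 1
    if aantalB' > aantalA' then false else goedLoop a rest aantalA' aantalB'

def loketRijenNaiefSlimmer (lengte : Int) (a : String) (b : String) : List (List String) :=
  (pyProduct ((a ++ b).toList.map (fun c => String.ofList [c])) lengte.toNat).foldl
    (fun result optie => if goedLoop a optie 0 0 then result ++ [optie] else result) []

-- ===== PORT B =====
-- one stack entry: (seq, na, nb, rem)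
-- the inner for-loop of B: push the valid extensions of (seq, na, nb), walking
-- rpool (= the reversed pool) so that they pop in pool order.
def pushChildren (a : String) (seq : List String) (na nb : Int) (rem : Nat)
    (stack : List (List String × Int × Int × Nat)) (rpool : List String) :
    List (List String × Int × Int × Nat) :=
  rpool.foldl (fun st t =>
    let na2 := if t == a then na + 1 else na
    let nb2 := if t == a then nb else nb + 1
    if nb2 ≤ na2 then (seq ++ [t], na2, nb2, rem) :: st else st) stack

-- measure justifying the while-loop's termination, and the lemmas backLoop's
-- decreasing_by cites
def stackWeight (P : Nat) (st : List (List String × Int × Int × Nat)) : Nat :=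
  (st.map (fun e => (P + 1) ^ e.2.2.2)).sum

theorem stackWeight_cons (P : Nat) (e : List String × Int × Int × Nat)
    (st : List (List String × Int × Int × Nat)) :
    stackWeight P (e :: st) = (P + 1) ^ e.2.2.2 + stackWeight P st := by
  simp [stackWeight]

theorem pushChildren_weight_le (a : String) (seq : List String) (na nb : Int) (rem : Nat)
    (P : Nat) :
    ∀ (l : List String) (stack : List (List String × Int × Int × Nat)),
    stackWeight P (pushChildren a seq na nb rem stack l) ≤
      l.length * (P + 1) ^ rem + stackWeight P stack := by
  intro l
  induction l with
  | nil => intro stack; simp [pushChildren]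
  | cons t l ih =>
    intro stack
    have hstep : pushChildren a seq na nb rem stack (t :: l) =
        pushChildren a seq na nb rem
          (if (if t == a then nb else nb + 1) ≤ (if t == a then na + 1 else na) then
            (seq ++ [t], (if t == a then na + 1 else na), (if t == a then nb else nb + 1), rem) :: stack
          else stack) l := rfl
    rw [hstep]
    refine le_trans (ih _) ?_
    have hw : stackWeight P
        (if (if t == a then nb else nb + 1) ≤ (if t == a then na + 1 else na) then
          (seq ++ [t], (if t == a then na + 1 else na), (if t == a then nb else nb + 1), rem) :: stack
        else stack) ≤ (P + 1) ^ rem + stackWeight P stack := by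
      split_ifs <;> (try simp only [stackWeight_cons]) <;> omega
    simp only [List.length_cons, Nat.succ_mul]
    omega

theorem pushChildren_weight_lt (a : String) (seq : List String) (na nb : Int) (rem : Nat)
    (rpool : List String) (stack : List (List String × Int × Int × Nat)) :
    stackWeight rpool.length (pushChildren a seq na nb rem stack rpool) <
      stackWeight rpool.length ((seq, na, nb, rem + 1) :: stack) := by
  refine lt_of_le_of_lt (pushChildren_weight_le a seq na nb rem rpool.length rpool stack) ?_
  simp only [stackWeight_cons]
  have h1 : 1 ≤ (rpool.length + 1) ^ rem := Nat.one_le_pow _ _ (by omega)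
  have h2 : (rpool.length + 1) ^ (rem + 1) =
      rpool.length * (rpool.length + 1) ^ rem + (rpool.length + 1) ^ rem := by ring
  omega

-- the while loop: pop an entry; rem = 0 emits the sequence, otherwise its
-- valid extensions are pushed.
def backLoop (a : String) (rpool : List String) :
    List (List String × Int × Int × Nat) → List (List String) → List (List String)
  | [], result => result
  | (seq, _, _, 0) :: stack, result => backLoop a rpool stack (result ++ [seq])
  | (seq, na, nb, rem + 1) :: stack, result =>
      backLoop a rpool (pushChildren a seq na nb rem stack rpool) result
termination_by st _ => stackWeight rpool.length st
decreasing_by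
  · rw [stackWeight_cons, pow_zero]; omega
  · exact pushChildren_weight_lt a seq na nb rem rpool stack

def loketRijenNaiefSlimmer_alt (lengte : Int) (a : String) (b : String) : List (List String) :=
  backLoop a ((a ++ b).toList.map (fun c => String.ofList [c])).reverse [([], 0, 0, lengte.toNat)] []

-- ===== PRECONDITION & SPEC =====
-- A raises ValueError (itertools.product with negative repeat) for lengte < 0.
def Pre_loketRijenNaiefSlimmer (lengte : Int) (a : String) (b : String) : Prop := 0 ≤ lengte
instance (lengte : Int) (a : String) (b : String) : Decidable (Pre_loketRijenNaiefSlimmer lengte a b) := by unfold Pre_loketRijenNaiefSlimmer; infer_instance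
def pvWitness_loketRijenNaiefSlimmer : Int × String × String := (3, "A", "B")

def Spec_loketRijenNaiefSlimmer (lengte : Int) (a : String) (b : String) (out : List (List String)) : Prop := out = loketRijenNaiefSlimmer_alt lengte a b
instance (lengte : Int) (a : String) (b : String) (out : List (List String)) : Decidable (Spec_loketRijenNaiefSlimmer lengte a b out) := by unfold Spec_loketRijenNaiefSlimmer; infer_instance

-- ===== CLAIM (what is proved, stated in full; the proofs are below) =====
def Claim_equal_loketRijenNaiefSlimmer : Prop := ∀ (lengte : Int) (a : String) (b : String), Dom_loketRijenNaiefSlimmer lengte a b → Pre_loketRijenNaiefSlimmer lengte a b → Spec_loketRijenNaiefSlimmer lengte a b (loketRijenNaiefSlimmer lengte a b)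

-- ===== LEMMAS AND PROOFS =====

theorem goedLoop_cons (a t : String) (o : List String) (na nb : Int) :
    goedLoop a (t :: o) na nb =
      if (if t == a then nb else nb + 1) > (if t == a then na + 1 else na) then false
      else goedLoop a o (if t == a then na + 1 else na) (if t == a then nb else nb + 1) := rfl

-- the recursive tree of valid extensions (reference object for both ports)
def back (a : String) (pool : List String) : Int → Int → Nat → List (List String)
  | _, _, 0 => [[]]
  | na, nb, n + 1 =>
    pool.flatMap (fun t =>
      let na2 := if t == a then na + 1 else na
      let nb2 := if t == a then nb else nb + 1
      if nb2 > na2 then [] else (back a pool na2 nb2 n).map (fun s => t :: s))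

-- A's filter loop computes exactly the backtracking tree
theorem back_eq_filter (a : String) (pool : List String) (n : Nat) :
    ∀ (na nb : Int), back a pool na nb n =
      (pyProduct pool n).filter (fun o => goedLoop a o na nb) := by
  induction n with
  | zero => intro na nb; simp [back, pyProduct, goedLoop]
  | succ n ih =>
    intro na nb
    simp only [back, pyProduct, List.filter_flatMap]
    apply List.flatMap_congr
    intro t _
    rw [List.filter_map]
    simp only [Function.comp_def, goedLoop_cons]
    split_ifs <;> simp [ih]

-- the pushed children, read back in pop order
theorem pushChildren_eq (a : String) (seq : List String) (na nb : Int) (rem : Nat)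
    (pool : List String) (st : List (List String × Int × Int × Nat)) :
    pushChildren a seq na nb rem st pool.reverse =
      (pool.flatMap (fun t =>
        let na2 := if t == a then na + 1 else na
        let nb2 := if t == a then nb else nb + 1
        if nb2 ≤ na2 then [(seq ++ [t], na2, nb2, rem)] else [])) ++ st := by
  unfold pushChildren
  rw [List.foldl_reverse]
  induction pool with
  | nil => simp
  | cons t rest ih =>
    simp only [List.foldr_cons, List.flatMap_cons, ih]
    split_ifs <;> simp

-- loop invariant: the while loop emits, after result, the trees of all stack entries
theorem backLoop_eq (a : String) (pool : List String) :
    ∀ (st : List (List String × Int × Int × Nat)) (result : List (List String)),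
    backLoop a pool.reverse st result =
      result ++ st.flatMap (fun e => (back a pool e.2.1 e.2.2.1 e.2.2.2).map (fun s => e.1 ++ s)) := by
  intro st result
  fun_induction backLoop a pool.reverse st result with
  | case1 result => simp
  | case2 seq na nb stack result ih => simp [ih, back]
  | case3 seq na nb rem stack result ih =>
    rw [ih, pushChildren_eq]
    simp only [List.flatMap_append, List.flatMap_cons, List.flatMap_assoc,
      ← List.append_assoc]
    congr 2
    show _ = (back a pool na nb (rem + 1)).map (fun s => seq ++ s)
    simp only [back, List.map_flatMap]
    apply List.flatMap_congr
    intro t _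
    split_ifs <;> first
      | omega
      | simp
      | (simp only [List.flatMap_cons, List.flatMap_nil, List.append_nil, List.map_map]
         apply List.map_congr_left
         intro s _
         simp)

theorem loketRijenNaiefSlimmer_spec : Claim_equal_loketRijenNaiefSlimmer := by
  intro lengte a b _ _
  unfold Spec_loketRijenNaiefSlimmer loketRijenNaiefSlimmer loketRijenNaiefSlimmer_alt
  rw [PySem.List.foldl_append_if, backLoop_eq, ← back_eq_filter]
  simp
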